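-- pv_equiv track=rewrite | github.com/WiluGIT/biometrics | ImageTresholdWindow.py | count_pixels_histogram_without_zeros
-- ===== SOURCE A (Python) =====
-- def count_pixels_histogram_without_zeros(seq):
--     hist = {}
--     for i in seq:
--         hist[i] = hist.get(i, 0) + 1
--     sort_dic = {}
--     for j in sorted(hist):
--         sort_dic.update({j: hist[j]})
--     return sort_dic
-- ===== SOURCE B (Python) =====
-- def count_pixels_histogram_without_zeros(seq):
--     s = sorted(seq)
--     out = {}
--     run_val = 0
--     run_len = 0
--     for x in s:
--         if run_len != 0 and x == run_val:
--             run_len += 1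
--         else:
--             if run_len != 0:
--                 out[run_val] = run_len
--             run_val = x
--             run_len = 1
--     if run_len != 0:
--         out[run_val] = run_len
--     return out
-- ===== Notes on version B (the rewrite author's own statement) =====
-- stated objective: faster
-- what changed: B replaces A's hash-count-then-sort-keys (per-element dict get/set loop, then rebuild in sorted key order) by one sort of the whole sequence followed by a single run-length grouping pass over the sorted list.
import Mathlib
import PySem

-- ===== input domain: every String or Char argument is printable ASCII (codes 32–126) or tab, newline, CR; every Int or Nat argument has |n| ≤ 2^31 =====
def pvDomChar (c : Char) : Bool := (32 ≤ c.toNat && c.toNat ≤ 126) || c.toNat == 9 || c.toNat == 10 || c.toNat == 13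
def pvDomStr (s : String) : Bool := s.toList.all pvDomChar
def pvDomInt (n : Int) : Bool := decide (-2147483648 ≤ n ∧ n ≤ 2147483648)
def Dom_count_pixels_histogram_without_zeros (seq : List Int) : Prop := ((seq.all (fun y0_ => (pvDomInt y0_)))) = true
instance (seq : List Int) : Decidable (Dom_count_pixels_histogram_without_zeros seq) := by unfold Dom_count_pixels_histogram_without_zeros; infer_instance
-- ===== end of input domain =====

-- B builds the histogram by sorting the whole sequence once and grouping consecutive equal runs,
-- instead of A's hash-count-then-sort-keys; same result; a timing run measured B faster (constant-factor: C-level sort replaces the per-element dict loop).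

-- ===== PORT A =====
def count_pixels_histogram_without_zeros (seq : List Int) : List (Int × Int) :=
  let hist := seq.foldl (fun d i => d.insert i (d.getD i 0 + 1)) PySem.Dict.empty
  -- hist[j]: j ranges over sorted(hist), so j is always a key of hist and getD's default is never taken
  let sort_dic := (PySem.List.sorted hist.keys (fun x => x)).foldl
      (fun d j => d.insert j (hist.getD j 0)) PySem.Dict.empty
  sort_dic.items

-- ===== PORT B =====
def count_pixels_histogram_without_zeros_alt (seq : List Int) : List (Int × Int) :=
  let s := PySem.List.sorted seq (fun x => x)
  -- state = (out, run_val, run_len); run_len = 0 only before the first element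
  let st := s.foldl (fun (st : List (Int × Int) × Int × Int) x =>
      if st.2.2 ≠ 0 ∧ x = st.2.1 then (st.1, st.2.1, st.2.2 + 1)
      else ((if st.2.2 ≠ 0 then st.1 ++ [(st.2.1, st.2.2)] else st.1), x, 1))
    ([], 0, 0)
  if st.2.2 ≠ 0 then st.1 ++ [(st.2.1, st.2.2)] else st.1

-- ===== PRECONDITION & SPEC =====
def Spec_count_pixels_histogram_without_zeros (seq : List Int) (out : List (Int × Int)) : Prop := out = count_pixels_histogram_without_zeros_alt seq
instance (seq : List Int) (out : List (Int × Int)) : Decidable (Spec_count_pixels_histogram_without_zeros seq out) := by unfold Spec_count_pixels_histogram_without_zeros; infer_instance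

-- ===== CLAIM (what is proved, stated in full; the proofs are below) =====
def Claim_equal_count_pixels_histogram_without_zeros : Prop := ∀ (seq : List Int), Dom_count_pixels_histogram_without_zeros seq → Spec_count_pixels_histogram_without_zeros seq (count_pixels_histogram_without_zeros seq)

-- ===== LEMMAS AND PROOFS =====

-- run-length grouping of a list, recursively (proof-only reformulation of B's loop)
def pvG (x rl : Int) : List Int → List (Int × Int)
  | [] => [(x, rl)]
  | y :: t => if y = x then pvG x (rl + 1) t else (x, rl) :: pvG y 1 t

-- B's loop body and final flush, as named functions (definitionally equal to the port's lambdas)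
def pvStep (st : List (Int × Int) × Int × Int) (x : Int) : List (Int × Int) × Int × Int :=
  if st.2.2 ≠ 0 ∧ x = st.2.1 then (st.1, st.2.1, st.2.2 + 1)
  else ((if st.2.2 ≠ 0 then st.1 ++ [(st.2.1, st.2.2)] else st.1), x, 1)
def pvFlush (st : List (Int × Int) × Int × Int) : List (Int × Int) :=
  if st.2.2 ≠ 0 then st.1 ++ [(st.2.1, st.2.2)] else st.1

-- B's fold (with final flush) equals pvG once a run has started
theorem pvFold_eq_pvG (t : List Int) (out : List (Int × Int)) (x rl : Int) (h : 0 < rl) :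
    pvFlush (t.foldl pvStep (out, x, rl)) = out ++ pvG x rl t := by
  induction t generalizing out x rl with
  | nil => simp [pvFlush, pvG, h.ne']
  | cons y t ih =>
    rw [List.foldl_cons, pvG]
    by_cases hy : y = x
    · rw [show pvStep (out, x, rl) y = (out, x, rl + 1) by simp [pvStep, hy, h.ne']]
      rw [ih out x (rl + 1) (by omega), if_pos hy]
    · rw [show pvStep (out, x, rl) y = (out ++ [(x, rl)], y, 1) by
        simp [pvStep, hy, h.ne']]
      rw [ih (out ++ [(x, rl)]) y 1 one_pos, if_neg hy]
      simp

-- Set.ofList commutes with filter (first occurrences of a filtered list)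
theorem pvOfList_filter (p : Int → Bool) (l : List Int) :
    PySem.Set.ofList (l.filter p) = (PySem.Set.ofList l).filter p := by
  induction l with
  | nil => simp [PySem.Set.ofList_nil]
  | cons x t ih =>
    by_cases hp : p x
    · rw [show (x :: t).filter p = x :: t.filter p by simp [hp],
        PySem.Set.ofList_cons, PySem.Set.ofList_cons,
        show ((x :: (PySem.Set.ofList t).discard x).filter p) = x :: ((PySem.Set.ofList t).discard x).filter p by simp [hp]]
      simp only [PySem.Set.discard, List.filter_filter, ih]
      congr 1
      apply List.filter_congr
      intro a _
      simp [Bool.and_comm]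
    · rw [show (x :: t).filter p = t.filter p by simp [hp],
        PySem.Set.ofList_cons,
        show ((x :: (PySem.Set.ofList t).discard x).filter p) = ((PySem.Set.ofList t).discard x).filter p by simp [hp]]
      simp only [PySem.Set.discard, List.filter_filter, ih]
      apply List.filter_congr
      intro a _
      by_cases hax : a = x
      · simp [hax, hp]
      · simp [hax]

-- Set.ofList is a sublist (first occurrences, in order)
theorem pvOfList_sublist (l : List Int) : (PySem.Set.ofList l).Sublist l := by
  induction l with
  | nil => simp [PySem.Set.ofList_nil]
  | cons x t ih =>
    rw [PySem.Set.ofList_cons]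
    have h1 : ((PySem.Set.ofList t).discard x).Sublist (PySem.Set.ofList t) :=
      List.filter_sublist
    exact List.Sublist.cons₂ x (h1.trans ih)

-- pvG on a sorted tail: head run, then one entry per strictly larger distinct value
theorem pvG_spec (t : List Int) (x rl : Int) (h : (x :: t).Pairwise (· ≤ ·)) :
    pvG x rl t = (x, rl + (t.count x : Int)) ::
      (PySem.Set.ofList (t.filter (fun z => decide (x < z)))).map
        (fun k => (k, (t.count k : Int))) := by
  induction t generalizing x rl with
  | nil => simp [pvG]
  | cons y u ih =>
    rcases List.pairwise_cons.mp h with ⟨hxall, hyu⟩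
    have hyall : ∀ z ∈ u, y ≤ z := (List.pairwise_cons.mp hyu).1
    by_cases hy : y = x
    · subst hy
      rw [pvG, if_pos rfl, ih y (rl + 1) hyu]
      have hf : (y :: u).filter (fun z => decide (y < z)) = u.filter (fun z => decide (y < z)) := by
        simp
      rw [hf]
      congr 1
      · simp [List.count_cons_self]; ring
      · apply List.map_congr_left
        intro k hk
        have hky : y < k := by
          have hkm := (PySem.Set.mem_ofList _ k).mp hk
          simpa using (List.mem_filter.mp hkm).2
        simp [show ¬(y = k) from by omega]
    · have hxy : x < y := lt_of_le_of_ne (hxall y (by simp)) (Ne.symm hy)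
      rw [pvG, if_neg hy, ih y 1 hyu]
      have hcx : (y :: u).count x = 0 := by
        rw [List.count_eq_zero]
        intro hmem
        rcases List.mem_cons.mp hmem with h1 | h1
        · exact hy h1.symm
        · exact absurd (hyall x h1) (by omega)
      have hfu : u.filter (fun z => decide (x < z)) = u :=
        List.filter_eq_self.mpr (fun a ha => by simpa using lt_of_lt_of_le hxy (hyall a ha))
      have hfilt : (y :: u).filter (fun z => decide (x < z)) = y :: u := by
        rw [List.filter_cons_of_pos (by simpa using hxy), hfu]
      rw [hfilt, PySem.Set.ofList_cons]
      have hdisc : (PySem.Set.ofList u).discard y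
          = PySem.Set.ofList (u.filter (fun z => decide (y < z))) := by
        have h1 : u.filter (fun z => decide (y < z)) = u.filter (fun z => !(z == y)) := by
          apply List.filter_congr
          intro a ha
          have hya := hyall a ha
          have h2 : (y < a) ↔ ¬(a = y) :=
            ⟨fun hlt he => by omega, fun hne => lt_of_le_of_ne hya (Ne.symm hne)⟩
          simp [h2, Eq.symm (Bool.beq_eq_decide_eq a y)]
        rw [h1, pvOfList_filter]
        rfl
      rw [List.map_cons]
      congr 1
      · simp [hcx]
      rw [← hdisc]
      congr 1
      · simp [List.count_cons_self]; ring
      · apply List.map_congr_left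
        intro k hk
        have hky : y < k := by
          have := PySem.Set.mem_discard (PySem.Set.ofList u) y k |>.mp hk
          have hku : k ∈ u := (PySem.Set.mem_ofList u k).mp this.1
          exact lt_of_le_of_ne (hyall k hku) (Ne.symm this.2)
        simp [show ¬(y = k) from by omega]

-- A's result is the sorted distinct values of seq, each paired with its multiplicity
theorem pvA_items (seq : List Int) : count_pixels_histogram_without_zeros seq =
    (PySem.List.sorted (PySem.Set.ofList seq) (fun x => x)).map
      (fun j => (j, (seq.count j : Int))) := by
  simp only [count_pixels_histogram_without_zeros]
  rw [PySem.Dict.foldl_insert_getD_add_one_eq_counter, PySem.Dict.keys_counter]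
  have hnd : (PySem.List.sorted (PySem.Set.ofList seq) (fun x => x)).Nodup :=
    (PySem.List.sorted_ofList_pairwise_lt seq).imp ne_of_lt
  rw [PySem.Dict.items_foldl_insert_fresh
        (PySem.List.sorted (PySem.Set.ofList seq) (fun x => x))
        (fun j => j) (fun j => (PySem.Dict.counter seq).getD j 0) PySem.Dict.empty
        (fun a _ => PySem.Dict.contains_empty a)
        (by simpa using hnd)]
  simp only [show (PySem.Dict.empty : PySem.Dict Int Int).items = [] from rfl, List.nil_append]
  exact List.map_congr_left fun j _ => by rw [PySem.Dict.getD_counter]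

theorem pvMain (seq : List Int) :
    count_pixels_histogram_without_zeros seq = count_pixels_histogram_without_zeros_alt seq := by
  have halt : count_pixels_histogram_without_zeros_alt seq
      = pvFlush ((PySem.List.sorted seq (fun x => x)).foldl pvStep ([], (0:Int), (0:Int))) := rfl
  rw [pvA_items, halt]
  cases hs : PySem.List.sorted seq (fun x => x) with
  | nil =>
    have hseq : seq = [] := (PySem.List.sorted_eq_nil_iff seq _ false).mp hs
    subst hseq
    rfl
  | cons x t =>
    have hpair : (x :: t).Pairwise (· ≤ ·) := by
      have := PySem.List.sorted_pairwise seq (fun x => x)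
      rwa [hs] at this
    rw [List.foldl_cons, show pvStep ([], (0:Int), (0:Int)) x = ([], x, 1) from by simp [pvStep],
      pvFold_eq_pvG t [] x 1 one_pos, List.nil_append, pvG_spec t x 1 hpair]
    -- the sorted distinct-key list is x followed by the distinct values of t above x
    have hsk : PySem.List.sorted (PySem.Set.ofList seq) (fun x => x)
        = x :: PySem.Set.ofList (t.filter (fun z => decide (x < z))) := by
      apply PySem.List.sorted_eq_of_perm_of_pairwise_lt
      · -- Perm
        apply (List.perm_ext_iff_of_nodup ?nd1 (PySem.Set.nodup_ofList seq)).mpr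
        case nd1 =>
          refine List.nodup_cons.mpr ⟨?_, PySem.Set.nodup_ofList _⟩
          intro hx
          have := (List.mem_filter.mp ((PySem.Set.mem_ofList _ x).mp hx)).2
          simp at this
        intro a
        have hmem : a ∈ seq ↔ a ∈ x :: t := by
          rw [← hs]; exact (PySem.List.sorted_perm seq (fun x => x) false).mem_iff.symm
        rw [PySem.Set.mem_ofList]
        constructor
        · intro ha
          rcases List.mem_cons.mp ha with h1 | h1
          · exact hmem.mpr (h1 ▸ List.mem_cons_self)
          · exact hmem.mpr (List.mem_cons_of_mem x (List.mem_filter.mp ((PySem.Set.mem_ofList _ a).mp h1)).1)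
        · intro ha
          rcases List.mem_cons.mp (hmem.mp ha) with h1 | h1
          · exact h1 ▸ List.mem_cons_self
          · by_cases hax : a = x
            · exact hax ▸ List.mem_cons_self
            · refine List.mem_cons_of_mem x ((PySem.Set.mem_ofList _ a).mpr (List.mem_filter.mpr ⟨h1, ?_⟩))
              have hxa : x ≤ a := (List.pairwise_cons.mp hpair).1 a h1
              simpa using lt_of_le_of_ne hxa (Ne.symm hax)
      · -- Pairwise <
        refine List.pairwise_cons.mpr ⟨?_, ?_⟩
        · intro k hk
          exact of_decide_eq_true (List.mem_filter.mp ((PySem.Set.mem_ofList _ k).mp hk)).2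
        · have hsub : (PySem.Set.ofList (t.filter (fun z => decide (x < z)))).Sublist t :=
            (pvOfList_sublist _).trans (List.filter_sublist)
          have hle : (PySem.Set.ofList (t.filter (fun z => decide (x < z)))).Pairwise (· ≤ ·) :=
            (List.pairwise_cons.mp hpair).2.sublist hsub
          have hne : (PySem.Set.ofList (t.filter (fun z => decide (x < z)))).Pairwise (· ≠ ·) :=
            PySem.Set.nodup_ofList _
          exact (hle.and hne).imp fun ⟨h1, h2⟩ => lt_of_le_of_ne h1 h2
    rw [hsk, List.map_cons]
    have hcnt : ∀ k : Int, seq.count k = (x :: t).count k := by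
      intro k
      rw [← hs]
      exact ((PySem.List.sorted_perm seq (fun x => x) false).count_eq k).symm
    congr 1
    · rw [hcnt x, List.count_cons_self]
      simp; ring
    · apply List.map_congr_left
      intro k hk
      have hxk : x < k := of_decide_eq_true (List.mem_filter.mp ((PySem.Set.mem_ofList _ k).mp hk)).2
      rw [hcnt k]
      simp [show ¬(x = k) from by omega]

-- ===== VERDICT (by name: the statement is the Claim_ definition above) =====
theorem count_pixels_histogram_without_zeros_spec : Claim_equal_count_pixels_histogram_without_zeros := by
  intro seq _
  exact pvMain seq
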